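-- pv_equiv track=rewrite | github.com/izuno4t/sqlym | src/sqlym/parser/tokenizer.py | _parse_helper_args
-- ===== SOURCE A (Python) =====
-- def _parse_helper_args(args_str: str) -> list[str]:
--     """補助関数の引数文字列をパースしてリストで返す.
--
--     引数はカンマまたは空白で区切られる。
--     文字列リテラル('...', "...")は1つの引数として扱う。
--
--     Args:
--         args_str: 引数文字列（例: "'%', param, '%'" または "'%' param '%'"）
--
--     Returns:
--         引数のリスト
--
--     """
--     args: list[str] = []
--     current = ""
--     in_single = False
--     in_double = False
--     i = 0
--
--     while i < len(args_str):
--         ch = args_str[i]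
--
--         if ch == "'" and not in_double:
--             if in_single and i + 1 < len(args_str) and args_str[i + 1] == "'":
--                 # エスケープされた引用符
--                 current += "''"
--                 i += 2
--                 continue
--             in_single = not in_single
--             current += ch
--         elif ch == '"' and not in_single:
--             if in_double and i + 1 < len(args_str) and args_str[i + 1] == '"':
--                 current += '""'
--                 i += 2
--                 continue
--             in_double = not in_double
--             current += ch
--         elif (ch == "," or ch.isspace()) and not in_single and not in_double:
--             if current.strip():
--                 args.append(current.strip())
--             current = ""
--         else:
--             current += ch
--         i += 1
--
--     if current.strip():
--         args.append(current.strip())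
--
--     return args
-- ===== SOURCE B (Python) =====
-- import re
--
-- # A token is a maximal run of quoted literals ('' / "" escapes allowed, a final
-- # quote may be unterminated) and plain characters; commas and whitespace outside
-- # quotes separate tokens.
-- _TOKEN_RE = re.compile(
--     r"(?:'(?:[^']|'')*'?"       # single-quoted literal
--     r"|\"(?:[^\"]|\"\")*\"?"    # double-quoted literal
--     r"|[^'\",\s])+"             # run of plain characters
-- )
--
--
-- def _parse_helper_args(args_str: str) -> list[str]:
--     out = []
--     for m in _TOKEN_RE.finditer(args_str):
--         s = m.group().strip()
--         if s:
--             out.append(s)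
--     return out
-- ===== Notes on version B (the rewrite author's own statement) =====
-- stated objective: idiomatic
-- what changed: Replaced the character-by-character in_single/in_double flag-toggling state machine with a regex-based tokenizer (re.finditer over a pattern alternating single-quoted literals with '' escapes, double-quoted literals with "" escapes, and runs of plain non-delimiter characters), stripping each match.
import Mathlib
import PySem

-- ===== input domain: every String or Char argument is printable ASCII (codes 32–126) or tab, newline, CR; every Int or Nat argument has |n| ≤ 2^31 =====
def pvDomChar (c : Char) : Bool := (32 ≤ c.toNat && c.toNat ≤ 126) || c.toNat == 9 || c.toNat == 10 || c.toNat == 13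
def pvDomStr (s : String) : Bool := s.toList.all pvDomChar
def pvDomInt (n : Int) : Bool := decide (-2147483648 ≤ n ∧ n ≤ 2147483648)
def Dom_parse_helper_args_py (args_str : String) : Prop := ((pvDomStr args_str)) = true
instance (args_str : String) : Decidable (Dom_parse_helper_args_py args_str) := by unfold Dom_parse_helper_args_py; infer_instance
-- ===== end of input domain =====

-- B replaces A's character-by-character in_single/in_double flag loop by a tokenizer that
-- matches whole quoted literals and plain runs at once (regex in Python); objective: idiomatic.


-- ===== PORT A =====
-- Literal port of A's while-loop over the characters: state (current, in_single, in_double, args);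
-- the '' / "" escape consumes two characters (the call on rest.tail).
def parseLoopA : List Char → List Char → Bool → Bool → List String → List String
  | [], cur, _, _, args =>
      if PySem.Chars.strip cur ≠ [] then args ++ [String.ofList (PySem.Chars.strip cur)] else args
  | ch :: rest, cur, in_s, in_d, args =>
      if ch == '\'' && !in_d then
        if in_s && rest.head? == some '\'' then
          parseLoopA rest.tail (cur ++ ['\'', '\'']) in_s in_d args
        else
          parseLoopA rest (cur ++ ['\'']) (!in_s) in_d args
      else if ch == '"' && !in_s then
        if in_d && rest.head? == some '"' then
          parseLoopA rest.tail (cur ++ ['"', '"']) in_s in_d args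
        else
          parseLoopA rest (cur ++ ['"']) in_s (!in_d) args
      else if (ch == ',' || PySem.Chars.isspace ch) && !in_s && !in_d then
        parseLoopA rest [] in_s in_d
          (if PySem.Chars.strip cur ≠ [] then args ++ [String.ofList (PySem.Chars.strip cur)] else args)
      else
        parseLoopA rest (cur ++ [ch]) in_s in_d args
termination_by l _ _ _ _ => l.length
decreasing_by all_goals (simp [List.length_tail]; try omega)

def parse_helper_args_py (args_str : String) : List String :=
  parseLoopA args_str.toList [] false false []

-- ===== PORT B =====
-- B's delimiter class: comma or whitespace (Python's regex \s on str matches exactly the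
-- str.isspace characters = PySem.Chars.isspace, so this is exact).
def pvIsDelim (c : Char) : Bool := c == ',' || PySem.Chars.isspace c

-- Exact port of the quoted-literal alternative q(?:[^q]|qq)*q? of Source B's regex, applied after
-- the opening quote q: returns (matched characters after the opener, rest of the input).
def pvMatchQ (q : Char) : List Char → List Char × List Char
  | [] => ([], [])
  | [c] => if c == q then ([q], []) else ([c], [])
  | c :: c2 :: rest2 =>
      if c == q then
        if c2 == q then
          let pr := pvMatchQ q rest2
          (q :: q :: pr.1, pr.2)
        else ([q], c2 :: rest2)
      else
        let pr := pvMatchQ q (c2 :: rest2)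
        (c :: pr.1, pr.2)

theorem pvMatchQ_len (q : Char) : ∀ l : List Char, (pvMatchQ q l).2.length ≤ l.length := by
  intro l
  induction hn : l.length using Nat.strong_induction_on generalizing l with
  | _ n ih =>
  subst hn
  rcases l with _ | ⟨c, _ | ⟨c2, rest2⟩⟩
  · simp [pvMatchQ]
  · by_cases hc : c == q <;> simp [pvMatchQ, hc]
  · by_cases hc : c == q
    · by_cases h2 : c2 == q
      · have := ih rest2.length (by simp) rest2 rfl
        simp [pvMatchQ, hc, h2]; omega
      · simp [pvMatchQ, hc, h2]

    · have := ih (c2 :: rest2).length (by simp) (c2 :: rest2) rfl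
      simp only [pvMatchQ, if_neg hc]
      simp at this ⊢; omega

-- One token of Source B's regex: (quoted-single | quoted-double | plain char)+ ; returns
-- (token, rest); on a delimiter or end of input the token is over.
def pvScanTok : List Char → List Char × List Char
  | [] => ([], [])
  | c :: rest =>
      if c == '\'' then
        let pr := pvMatchQ '\'' rest
        let tr := pvScanTok pr.2
        ('\'' :: pr.1 ++ tr.1, tr.2)
      else if c == '"' then
        let pr := pvMatchQ '"' rest
        let tr := pvScanTok pr.2
        ('"' :: pr.1 ++ tr.1, tr.2)
      else if pvIsDelim c then ([], c :: rest)
      else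
        let tr := pvScanTok rest
        (c :: tr.1, tr.2)
termination_by l => l.length
decreasing_by
  · have := pvMatchQ_len '\'' rest; simp at this ⊢; omega
  · have := pvMatchQ_len '"' rest; simp at this ⊢; omega
  · simp

theorem pvScanTok_len : ∀ l : List Char, (pvScanTok l).2.length ≤ l.length := by
  intro l
  induction hn : l.length using Nat.strong_induction_on generalizing l with
  | _ n ih =>
  subst hn
  rcases l with _ | ⟨c, rest⟩
  · simp [pvScanTok]
  · rw [pvScanTok]
    by_cases h1 : c == '\''
    · have ha := pvMatchQ_len '\'' rest
      have hb := ih (pvMatchQ '\'' rest).2.length (by simp; omega) _ rfl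
      simp [h1]; omega
    · rw [if_neg h1]
      by_cases h2 : c == '"'
      · have ha := pvMatchQ_len '"' rest
        have hb := ih (pvMatchQ '"' rest).2.length (by simp; omega) _ rfl
        simp [h2]; omega
      · rw [if_neg h2]
        by_cases h3 : pvIsDelim c
        · simp [h3]
        · have hb := ih rest.length (by simp) rest rfl
          simp [h3]; omega

theorem pvScanTok_len_lt (c : Char) (rest : List Char) (h : ¬ pvIsDelim c = true) :
    (pvScanTok (c :: rest)).2.length < (c :: rest).length := by
  simp only [pvScanTok]
  by_cases h1 : c == '\''
  · simp only [h1, if_true]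
    have h2 := pvScanTok_len (pvMatchQ '\'' rest).2
    have h3 := pvMatchQ_len '\'' rest
    simp; omega
  · rw [if_neg h1]
    by_cases h4 : c == '"'
    · simp only [h4, if_true]
      have h2 := pvScanTok_len (pvMatchQ '"' rest).2
      have h3 := pvMatchQ_len '"' rest
      simp; omega
    · rw [if_neg h4, if_neg h]
      have h2 := pvScanTok_len rest
      simp; omega

-- finditer over Source B's token regex: delimiters between tokens are skipped, each token is
-- stripped and dropped if empty (the loop body of Source B).
def pvTokens : List Char → List String
  | [] => []
  | c :: rest =>
      if h : pvIsDelim c then pvTokens rest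
      else
        let tr := pvScanTok (c :: rest)
        (if PySem.Chars.strip tr.1 ≠ [] then [String.ofList (PySem.Chars.strip tr.1)] else []) ++
          pvTokens tr.2
termination_by l => l.length
decreasing_by
  · simp
  · exact pvScanTok_len_lt c rest h

def parse_helper_args_py_alt (args_str : String) : List String :=
  pvTokens args_str.toList

-- ===== PRECONDITION & SPEC =====
def Spec_parse_helper_args_py (args_str : String) (out : List String) : Prop := out = parse_helper_args_py_alt args_str
instance (args_str : String) (out : List String) : Decidable (Spec_parse_helper_args_py args_str out) := by unfold Spec_parse_helper_args_py; infer_instance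

-- ===== CLAIM (what is proved, stated in full; the proofs are below) =====
def Claim_equal_parse_helper_args_py : Prop := ∀ (args_str : String), Dom_parse_helper_args_py args_str → Spec_parse_helper_args_py args_str (parse_helper_args_py args_str)

-- ===== LEMMAS AND PROOFS =====

-- the finalizer / emit step shared by both programs
def pvEmit (args : List String) (cur : List Char) : List String :=
  if PySem.Chars.strip cur ≠ [] then args ++ [String.ofList (PySem.Chars.strip cur)] else args

theorem pvEmit_append (args : List String) (cur : List Char) :
    pvEmit args cur = args ++ pvEmit [] cur := by
  unfold pvEmit; split <;> simp

theorem pvStrip_nil : PySem.Chars.strip [] = [] := by decide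

theorem pvDelim_ne_quote (c : Char) (h : pvIsDelim c = true) :
    (c == '\'') = false ∧ (c == '"') = false := by
  constructor
  · by_cases e : c = '\''
    · subst e; exact absurd h (by decide)
    · simp [e]
  · by_cases e : c = '"'
    · subst e; exact absurd h (by decide)
    · simp [e]

theorem pvMatchQ_cons_ne (q c : Char) (rest : List Char) (h : (c == q) = false) :
    pvMatchQ q (c :: rest) = (c :: (pvMatchQ q rest).1, (pvMatchQ q rest).2) := by
  rcases rest with _ | ⟨c2, rest2⟩ <;> simp [pvMatchQ, h]

-- While in_single is set, A copies characters (with the '' escape) until the closing quote: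
-- exactly pvMatchQ '\''.
theorem loopA_single : ∀ n (l cur : List Char) (args : List String), l.length ≤ n →
    parseLoopA l cur true false args =
      parseLoopA (pvMatchQ '\'' l).2 (cur ++ (pvMatchQ '\'' l).1) false false args := by
  intro n
  induction n with
  | zero =>
    intro l cur args h
    have hl : l = [] := by cases l <;> simp_all
    subst hl
    simp [parseLoopA, pvMatchQ]
  | succ n ih =>
    intro l cur args h
    rcases l with _ | ⟨c, rest⟩
    · simp [parseLoopA, pvMatchQ]
    · rw [parseLoopA]
      by_cases hc : c = '\''
      · subst hc
        rcases rest with _ | ⟨c2, rest2⟩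
        · simp [parseLoopA, pvMatchQ]
        · by_cases h2 : c2 = '\''
          · subst h2
            simp only [pvMatchQ, beq_self_eq_true, if_true, Bool.not_false, Bool.and_true,
              Bool.true_and, Option.some.injEq, List.head?_cons, List.tail_cons]
            have := ih rest2 (cur ++ ['\'', '\'']) args (by simp at h ⊢; omega)
            simp at this ⊢
            rw [this]; try simp
          · have hq : (c2 == '\'') = false := by simp [h2]
            simp only [pvMatchQ, beq_self_eq_true, if_true, hq, if_false,
              Bool.not_false, Bool.and_true, Bool.true_and, List.head?_cons, Option.some.injEq]
            simp [h2, parseLoopA]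
      · have hq : (c == '\'') = false := by simp [hc]
        rw [pvMatchQ_cons_ne '\'' c rest hq]
        by_cases hd : c = '"'
        · subst hd
          simp only [hq, Bool.false_and, if_false, beq_self_eq_true, Bool.not_true,
            Bool.and_false, Bool.false_and]
          have := ih rest (cur ++ ['"']) args (by simp at h ⊢; omega)
          simp at this ⊢
          rw [this]; try simp
        · have hq2 : (c == '"') = false := by simp [hd]
          simp only [hq, hq2, Bool.false_and, if_false, Bool.and_false]
          have := ih rest (cur ++ [c]) args (by simp at h ⊢; omega)
          simp only [Bool.not_true, Bool.and_false, Bool.false_and, if_false] at this ⊢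
          rw [this]; try simp

-- Same for in_double and pvMatchQ '"'.
theorem loopA_double : ∀ n (l cur : List Char) (args : List String), l.length ≤ n →
    parseLoopA l cur false true args =
      parseLoopA (pvMatchQ '"' l).2 (cur ++ (pvMatchQ '"' l).1) false false args := by
  intro n
  induction n with
  | zero =>
    intro l cur args h
    have hl : l = [] := by cases l <;> simp_all
    subst hl
    simp [parseLoopA, pvMatchQ]
  | succ n ih =>
    intro l cur args h
    rcases l with _ | ⟨c, rest⟩
    · simp [parseLoopA, pvMatchQ]
    · rw [parseLoopA]
      by_cases hc : c = '"'
      · subst hc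
        rcases rest with _ | ⟨c2, rest2⟩
        · simp [parseLoopA, pvMatchQ]
        · by_cases h2 : c2 = '"'
          · subst h2
            simp only [pvMatchQ, beq_self_eq_true, if_true, List.head?_cons, List.tail_cons]
            have := ih rest2 (cur ++ ['"', '"']) args (by simp at h ⊢; omega)
            simp at this ⊢
            rw [this]; try simp
          · have hq : (c2 == '"') = false := by simp [h2]
            simp only [pvMatchQ, beq_self_eq_true, if_true, hq, if_false, List.head?_cons,
              Option.some.injEq]
            simp [h2, parseLoopA]
      · have hq : (c == '"') = false := by simp [hc]
        rw [pvMatchQ_cons_ne '"' c rest hq]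
        by_cases hd : c = '\''
        · subst hd
          simp only [hq, beq_self_eq_true, Bool.not_true, Bool.and_false, Bool.false_and,
            if_false]
          have := ih rest (cur ++ ['\'']) args (by simp at h ⊢; omega)
          simp at this ⊢
          rw [this]; try simp
        · have hq2 : (c == '\'') = false := by simp [hd]
          simp only [hq, hq2, Bool.false_and, Bool.and_false, if_false]
          have := ih rest (cur ++ [c]) args (by simp at h ⊢; omega)
          simp only [Bool.not_true, Bool.and_false, Bool.false_and, if_false] at this ⊢
          rw [this]; try simp

-- pvTokens in scanner form: one token (possibly dropped after strip), then the rest.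
theorem pvTokens_eq (l : List Char) :
    pvTokens l = pvEmit [] (pvScanTok l).1 ++ pvTokens (pvScanTok l).2 := by
  rcases l with _ | ⟨c, rest⟩
  · simp [pvTokens, pvScanTok, pvEmit, pvStrip_nil]
  · by_cases h : pvIsDelim c
    · obtain ⟨hq1, hq2⟩ := pvDelim_ne_quote c h
      have hs : pvScanTok (c :: rest) = ([], c :: rest) := by
        rw [pvScanTok]; simp [hq1, hq2, h]
      rw [hs]
      rw [pvTokens]
      simp [h, pvEmit, pvStrip_nil]
    · rw [pvTokens]
      simp [h, pvEmit]

-- From the neutral state, A consumes exactly one scanner token, emits it, and repeats.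
theorem loopA_main : ∀ n (l cur : List Char) (args : List String), l.length ≤ n →
    parseLoopA l cur false false args =
      args ++ pvEmit [] (cur ++ (pvScanTok l).1) ++ pvTokens (pvScanTok l).2 := by
  intro n
  induction n with
  | zero =>
    intro l cur args h
    have hl : l = [] := by cases l <;> simp_all
    subst hl
    simp only [parseLoopA, pvScanTok, pvTokens, List.append_nil]
    by_cases hc : PySem.Chars.strip cur = [] <;> simp [pvEmit, hc]
  | succ n ih =>
    intro l cur args h
    rcases l with _ | ⟨c, rest⟩
    · simp only [parseLoopA, pvScanTok, pvTokens, List.append_nil]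
      by_cases hc : PySem.Chars.strip cur = [] <;> simp [pvEmit, hc]
    · rw [parseLoopA]
      by_cases hc : c = '\''
      · subst hc
        simp only [beq_self_eq_true, Bool.not_false, Bool.and_true, Bool.true_and,
          Bool.false_and, if_true, if_false]
        rw [pvScanTok]
        simp only [beq_self_eq_true, if_true]
        have h1 := loopA_single rest.length rest (cur ++ ['\'']) args le_rfl
        have h2 := ih (pvMatchQ '\'' rest).2 (cur ++ ['\''] ++ (pvMatchQ '\'' rest).1) args
          (by have := pvMatchQ_len '\'' rest; simp at this h ⊢; omega)
        simp at h1 h2 ⊢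
        rw [h1, h2]; try simp
      · have hq : (c == '\'') = false := by simp [hc]
        by_cases hd : c = '"'
        · subst hd
          simp only [hq, beq_self_eq_true, Bool.false_and, Bool.not_false, Bool.and_true,
            Bool.true_and, if_false, if_true]
          rw [pvScanTok]
          simp only [beq_self_eq_true, if_true]
          have hq' : ('"' == '\'') = false := by decide
          simp only [hq', if_false]
          have h1 := loopA_double rest.length rest (cur ++ ['"']) args le_rfl
          have h2 := ih (pvMatchQ '"' rest).2 (cur ++ ['"'] ++ (pvMatchQ '"' rest).1) args
            (by have := pvMatchQ_len '"' rest; simp at this h ⊢; omega)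
          simp at h1 h2 ⊢
          rw [h1, h2]; try simp
        · have hq2 : (c == '"') = false := by simp [hd]
          by_cases hdl : pvIsDelim c
          · have hcond : ((c == ',' || PySem.Chars.isspace c) && !false && !false) = true := by
              simp [pvIsDelim] at hdl; rcases hdl with h' | h' <;> simp [h']
            have hs : pvScanTok (c :: rest) = ([], c :: rest) := by
              rw [pvScanTok]; simp [hq, hq2, hdl]
            simp only [hq, hq2, Bool.false_and, Bool.and_false, Bool.false_eq_true, if_false,
              hcond, if_true]
            have h2 := ih rest [] (pvEmit args cur) (by simp at h ⊢; omega)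
            rw [show (if PySem.Chars.strip cur ≠ [] then
                  args ++ [String.ofList (PySem.Chars.strip cur)] else args) = pvEmit args cur
                from rfl]
            rw [h2, hs]
            rw [pvTokens]
            simp only [hdl, if_true]
            rw [pvEmit_append args cur]
            rw [pvTokens_eq rest]
            simp [pvEmit, pvStrip_nil]
          · have hcond : ((c == ',' || PySem.Chars.isspace c) && !false && !false) = false := by
              simp [pvIsDelim] at hdl; simp [hdl]
            have hs : pvScanTok (c :: rest) =
                (c :: (pvScanTok rest).1, (pvScanTok rest).2) := by
              rw [pvScanTok]; simp [hq, hq2, hdl]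
            simp only [hq, hq2, Bool.false_and, Bool.and_false, if_false, hcond]
            have h2 := ih rest (cur ++ [c]) args (by simp at h ⊢; omega)
            rw [h2, hs]; try simp

-- ===== VERDICT (by name: the statement is the Claim_ definition above) =====
theorem parse_helper_args_py_spec : Claim_equal_parse_helper_args_py := by
  intro s _
  unfold Spec_parse_helper_args_py parse_helper_args_py parse_helper_args_py_alt
  rw [loopA_main s.toList.length s.toList [] [] le_rfl, pvTokens_eq s.toList]
  simp [pvEmit]
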